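-- pv_equiv track=rewrite | github.com/snowbagoly/adventofcode2015 | day3.py | deliver
-- ===== SOURCE A (Python) =====
-- def go(direction,x,y):
--     if direction == "^":
--         return x-1,y
--     elif direction == "v":
--         return x+1,y
--     elif direction == ">":
--         return x,y+1
--     elif direction == "<":
--         return x,y-1
--
-- def deliver(path):
--     visited = set()
--     current = (0,0)
--     visited.add(current)
--     for direction in path:
--         current = go(direction,*current)
--         visited.add(current)
--     return visited
-- ===== SOURCE B (Python) =====
-- DELTAS = {"^": (-1, 0), "v": (1, 0), ">": (0, 1), "<": (0, -1)}
--
-- def deliver(path):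
--     # Divide and conquer: the houses visited on path[lo:hi] (walked from the
--     # origin) are the houses of the left half united with the houses of the
--     # right half translated by the left half's total displacement.  Each call
--     # returns (visited set, total displacement); depth is O(log n).
--     def solve(lo, hi):
--         if lo == hi:
--             return {(0, 0)}, (0, 0)
--         if hi - lo == 1:
--             d = DELTAS[path[lo]]
--             return {(0, 0), d}, d
--         mid = (lo + hi) // 2
--         sl, (dx, dy) = solve(lo, mid)
--         sr, (rx, ry) = solve(mid, hi)
--         return sl | {(x + dx, y + dy) for (x, y) in sr}, (dx + rx, dy + ry)
--     return solve(0, len(path))[0]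
-- ===== Notes on version B (the rewrite author's own statement) =====
-- stated objective: alternative
-- what changed: Replaces the single imperative branch-and-mutate scan by a divide-and-conquer: recursively compute the visited set and total displacement of each half of the path, then union the left set with the right set translated by the left displacement.
-- outside the precondition, e.g. on deliver('x'): A returns {None, (0, 0)}, B raises KeyError; on deliver('^x^'): A raises TypeError, B raises KeyError
import Mathlib
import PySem

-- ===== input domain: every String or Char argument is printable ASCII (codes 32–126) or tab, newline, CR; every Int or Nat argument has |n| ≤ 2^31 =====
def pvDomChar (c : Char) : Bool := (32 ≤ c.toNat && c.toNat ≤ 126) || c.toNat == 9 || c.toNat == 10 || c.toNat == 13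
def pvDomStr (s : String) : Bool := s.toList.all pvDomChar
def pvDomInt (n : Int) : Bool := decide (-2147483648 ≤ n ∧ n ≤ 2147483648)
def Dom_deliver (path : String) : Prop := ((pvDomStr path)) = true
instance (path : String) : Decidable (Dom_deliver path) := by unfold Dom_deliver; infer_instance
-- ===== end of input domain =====

-- B replaces A's imperative branch-and-mutate scan by a divide-and-conquer on the
-- path: visited(whole) = visited(left half) ∪ translate(visited(right half)) (alternative).

-- ===== PORT A =====
-- go(direction, x, y): returns none where Python's go returns None (invalid char)
def goA (c : Char) (x y : Int) : Option (Int × Int) :=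
  if c = '^' then some (x - 1, y)
  else if c = 'v' then some (x + 1, y)
  else if c = '>' then some (x, y + 1)
  else if c = '<' then some (x, y - 1)
  else none

-- the for-loop: state = (visited, current); on an invalid char Python stores None
-- and raises on the next step / returns a set containing None — outside Pre_,
-- the port just stops there
def deliverLoop : List Char → PySem.Set (Int × Int) → Int × Int → List (Int × Int)
  | [], visited, _ => visited
  | c :: rest, visited, (x, y) =>
    match goA c x y with
    | some p => deliverLoop rest (PySem.Set.add visited p) p
    | none => visited

def deliver (path : String) : List (Int × Int) :=
  deliverLoop path.toList (PySem.Set.add PySem.Set.empty (0, 0)) (0, 0)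

-- ===== PORT B =====
def deltasB : PySem.Dict Char (Int × Int) :=
  PySem.Dict.ofList [('^', (-1, 0)), ('v', (1, 0)), ('>', (0, 1)), ('<', (0, -1))]

-- Source B's solve(lo, hi) ported on the segment path[lo:hi] itself; mid = (lo+hi)//2
-- corresponds to splitting the segment at length/2.  DELTAS[c] raises KeyError on
-- an invalid char — the port returns none there (outside Pre_).
def solveB : List Char → Option (List (Int × Int) × (Int × Int))
  | [] => some ([((0 : Int), (0 : Int))], (0, 0))
  | [c] =>
    match deltasB.get? c with
    | some d => some (PySem.Set.add (PySem.Set.add PySem.Set.empty ((0 : Int), (0 : Int))) d, d)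
    | none => none
  | c1 :: c2 :: rest =>
    match solveB ((c1 :: c2 :: rest).take ((c1 :: c2 :: rest).length / 2)),
          solveB ((c1 :: c2 :: rest).drop ((c1 :: c2 :: rest).length / 2)) with
    | some (sl, dl), some (sr, dr) =>
        some (PySem.Set.union sl
                (PySem.Set.ofList (sr.map (fun p => (p.1 + dl.1, p.2 + dl.2)))),
              (dl.1 + dr.1, dl.2 + dr.2))
    | _, _ => none
termination_by cs => cs.length
decreasing_by
  · simp [List.length_take]; omega
  · simp; omega

def deliver_alt (path : String) : List (Int × Int) :=
  match solveB path.toList with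
  | some (s, _) => s
  | none => []

-- ===== PRECONDITION & SPEC =====
-- Pre_ excludes paths containing a non-direction character: there Python A raises
-- TypeError (or returns a set containing None, not a set of int pairs) and B raises KeyError.
def Pre_deliver (path : String) : Prop :=
  (path.toList.all (fun c => c = '^' || c = 'v' || c = '>' || c = '<')) = true
instance (path : String) : Decidable (Pre_deliver path) := by unfold Pre_deliver; infer_instance

def pvWitness_deliver : String := "^"

def Spec_deliver (path : String) (out : List (Int × Int)) : Prop := out = deliver_alt path
instance (path : String) (out : List (Int × Int)) : Decidable (Spec_deliver path out) := by unfold Spec_deliver; infer_instance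

-- ===== CLAIM (what is proved, stated in full; the proofs are below) =====
def Claim_equal_deliver : Prop := ∀ (path : String), Dom_deliver path → Pre_deliver path → Spec_deliver path (deliver path)

-- ===== LEMMAS AND PROOFS =====

-- the next position after one step (equals A's go on valid chars)
def nxt (c : Char) (p : Int × Int) : Int × Int := (goA c p.1 p.2).getD p

-- the full sequence of positions of the walk, start included
def walk : List Char → Int × Int → List (Int × Int)
  | [], p => [p]
  | c :: cs, p => p :: walk cs (nxt c p)

-- the final position of the walk
def finPos : List Char → Int × Int → Int × Int
  | [], p => p
  | c :: cs, p => finPos cs (nxt c p)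

def ValidDirs (cs : List Char) : Prop :=
  ∀ c ∈ cs, c = '^' ∨ c = 'v' ∨ c = '>' ∨ c = '<'

-- for each valid direction char: the dict delta and A's go agree
lemma valid_step (c : Char) (hc : c = '^' ∨ c = 'v' ∨ c = '>' ∨ c = '<') (x y : Int) :
    ∃ dx dy, deltasB.get? c = some (dx, dy) ∧ goA c x y = some (x + dx, y + dy) := by
  rcases hc with rfl | rfl | rfl | rfl
  · exact ⟨-1, 0, by decide, by simp [goA, sub_eq_add_neg]⟩
  · exact ⟨1, 0, by decide, by simp [goA]⟩
  · exact ⟨0, 1, by decide, by simp [goA]⟩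
  · exact ⟨0, -1, by decide, by simp [goA, sub_eq_add_neg]⟩

lemma nxt_shift (c : Char) (p q : Int × Int) :
    nxt c (p.1 + q.1, p.2 + q.2) = ((nxt c p).1 + q.1, (nxt c p).2 + q.2) := by
  unfold nxt goA
  split_ifs <;> simp [Prod.ext_iff] <;> ring

lemma walk_shift (cs : List Char) (p q : Int × Int) :
    walk cs (p.1 + q.1, p.2 + q.2) = (walk cs p).map (fun r => (r.1 + q.1, r.2 + q.2)) := by
  induction cs generalizing p with
  | nil => simp [walk]
  | cons c cs ih => simp only [walk, List.map_cons]; rw [nxt_shift, ih]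

lemma finPos_shift (cs : List Char) (p q : Int × Int) :
    finPos cs (p.1 + q.1, p.2 + q.2) = ((finPos cs p).1 + q.1, (finPos cs p).2 + q.2) := by
  induction cs generalizing p with
  | nil => simp [finPos]
  | cons c cs ih => simp only [finPos]; rw [nxt_shift, ih]

lemma walk_head (cs : List Char) (p : Int × Int) :
    walk cs p = p :: (walk cs p).tail := by
  cases cs <;> simp [walk]

lemma finPos_mem_walk (cs : List Char) (p : Int × Int) : finPos cs p ∈ walk cs p := by
  induction cs generalizing p with
  | nil => simp [walk, finPos]
  | cons c cs ih => simp [walk, finPos, ih]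

lemma walk_append (xs ys : List Char) (p : Int × Int) :
    walk (xs ++ ys) p = walk xs p ++ (walk ys (finPos xs p)).tail := by
  induction xs generalizing p with
  | nil => simpa [walk, finPos] using walk_head ys p
  | cons c xs ih => simp [walk, finPos, ih]

-- PySem.Set facts: union of two builds is the build of the concatenation
lemma union_ofList (xs ms : List (Int × Int)) :
    PySem.Set.union (PySem.Set.ofList xs) (PySem.Set.ofList ms) = PySem.Set.ofList (xs ++ ms) := by
  have h1 : PySem.Set.union (PySem.Set.ofList xs) (PySem.Set.ofList ms)
      = PySem.Set.update (PySem.Set.ofList xs) (PySem.Set.ofList ms) := rfl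
  have h2 : PySem.Set.ofList (xs ++ ms) = PySem.Set.update (PySem.Set.ofList xs) ms := by
    simp [PySem.Set.ofList_eq_foldl, PySem.Set.update, List.foldl_append]
  rw [h1, h2, PySem.Set.update_eq_append_filter, PySem.Set.update_eq_append_filter,
    PySem.Set.ofList_ofList]

-- adding an already-present element is a no-op, so a duplicate may be dropped
lemma add_of_mem (s : PySem.Set (Int × Int)) (y : Int × Int) (h : y ∈ s) :
    PySem.Set.add s y = s := by
  simp [PySem.Set.add, h]

lemma ofList_append_cons_of_mem (xs ys : List (Int × Int)) (y : Int × Int) (h : y ∈ xs) :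
    PySem.Set.ofList (xs ++ y :: ys) = PySem.Set.ofList (xs ++ ys) := by
  have hy : y ∈ PySem.Set.ofList xs := by simpa [PySem.Set.mem_ofList] using h
  simp only [PySem.Set.ofList_eq_foldl, List.foldl_append, List.foldl_cons]
  rw [add_of_mem _ _ (by rw [← PySem.Set.ofList_eq_foldl]; exact hy)]

lemma finPos_append (xs ys : List Char) (p : Int × Int) :
    finPos (xs ++ ys) p = finPos ys (finPos xs p) := by
  induction xs generalizing p with
  | nil => simp [finPos]
  | cons c xs ih => simp [finPos, ih]

-- A's loop builds exactly the set of walk positions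
lemma deliverLoop_eq (cs : List Char) (h : ValidDirs cs)
    (V : PySem.Set (Int × Int)) (p : Int × Int) :
    deliverLoop cs V p = List.foldl PySem.Set.add V (walk cs p).tail := by
  induction cs generalizing V p with
  | nil => simp [deliverLoop, walk]
  | cons c rest ih =>
    obtain ⟨x, y⟩ := p
    obtain ⟨dx, dy, hd, hg⟩ := valid_step c (h c (by simp)) x y
    have hn : nxt c (x, y) = (x + dx, y + dy) := by simp [nxt, hg]
    simp only [deliverLoop, hg, walk, List.tail_cons]
    rw [hn, walk_head rest (x + dx, y + dy)]
    simp only [List.foldl_cons]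
    exact ih (fun c hc => h c (by simp [hc])) _ _

lemma ofList_walk (cs : List Char) (p : Int × Int) :
    PySem.Set.ofList (walk cs p)
      = List.foldl PySem.Set.add (PySem.Set.add PySem.Set.empty p) (walk cs p).tail := by
  conv_lhs => rw [PySem.Set.ofList_eq_foldl, walk_head cs p]
  rfl

lemma add_map_shift (q : Int × Int) (s : List (Int × Int)) (x : Int × Int) :
    PySem.Set.add (s.map (fun p => (p.1 + q.1, p.2 + q.2))) (x.1 + q.1, x.2 + q.2)
      = (PySem.Set.add s x).map (fun p => (p.1 + q.1, p.2 + q.2)) := by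
  by_cases hm : x ∈ s <;>
    simp [PySem.Set.add, PySem.Set.contains, hm, Prod.ext_iff]

lemma foldl_add_map_shift (q : Int × Int) (xs s : List (Int × Int)) :
    List.foldl PySem.Set.add (s.map (fun p => (p.1 + q.1, p.2 + q.2)))
        (xs.map (fun p => (p.1 + q.1, p.2 + q.2)))
      = (List.foldl PySem.Set.add s xs).map (fun p => (p.1 + q.1, p.2 + q.2)) := by
  induction xs generalizing s with
  | nil => rfl
  | cons x xs ih => simp only [List.map_cons, List.foldl_cons, add_map_shift, ih]

lemma ofList_map_shift (q : Int × Int) (xs : List (Int × Int)) :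
    PySem.Set.ofList (xs.map (fun p => (p.1 + q.1, p.2 + q.2)))
      = (PySem.Set.ofList xs).map (fun p => (p.1 + q.1, p.2 + q.2)) := by
  have := foldl_add_map_shift q xs []
  simpa [PySem.Set.ofList_eq_foldl] using this

-- B's recursion computes the set of walk positions and the displacement
lemma solveB_eq : ∀ (cs : List Char), ValidDirs cs →
    solveB cs = some (PySem.Set.ofList (walk cs (0, 0)), finPos cs (0, 0)) := by
  intro cs
  induction cs using solveB.induct with
  | case1 => intro _; rw [solveB]; decide
  | case2 c d hd => intro h; rcases h c (by simp) with rfl | rfl | rfl | rfl <;> (rw [solveB]; decide)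
  | case3 c hd =>
    intro h
    rcases h c (by simp) with rfl | rfl | rfl | rfl <;> exact absurd hd (by decide)
  | case4 c1 c2 rest sl dl sr dr hR0 hL0 ihL ihR =>
    intro h
    have hLv := ihL (fun c hc => h c (List.take_subset _ _ hc))
    have hRv := ihR (fun c hc => h c (List.drop_subset _ _ hc))
    rw [solveB, hLv, hRv]
    dsimp only
    set m := (c1 :: c2 :: rest).length / 2 with hm
    set L := (c1 :: c2 :: rest).take m with hLdef
    set R := (c1 :: c2 :: rest).drop m with hRdef
    set dl := finPos L ((0 : Int), (0 : Int)) with hdl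
    set dr := finPos R ((0 : Int), (0 : Int)) with hdr
    have hmap : (walk R (0, 0)).map (fun p => (p.1 + dl.1, p.2 + dl.2)) = walk R dl := by
      have := walk_shift R (0, 0) dl
      simpa using this.symm
    have hsplit : L ++ R = c1 :: c2 :: rest := List.take_append_drop m _
    have hfin : (dl.1 + dr.1, dl.2 + dr.2) = finPos (c1 :: c2 :: rest) (0, 0) := by
      have hs : finPos R dl = (dr.1 + dl.1, dr.2 + dl.2) := by
        have := finPos_shift R (0, 0) dl
        simpa [hdr] using this
      rw [← hsplit, finPos_append, ← hdl, hs]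
      simp [Prod.ext_iff]; constructor <;> ring
    have hset : PySem.Set.union (PySem.Set.ofList (walk L (0, 0)))
        (PySem.Set.ofList ((PySem.Set.ofList (walk R (0, 0))).map
          (fun p => (p.1 + dl.1, p.2 + dl.2))))
        = PySem.Set.ofList (walk (c1 :: c2 :: rest) (0, 0)) := by
      rw [← ofList_map_shift, PySem.Set.ofList_ofList, hmap, union_ofList]
      rw [walk_head R dl]
      rw [ofList_append_cons_of_mem _ _ _ (by rw [hdl]; exact finPos_mem_walk L (0, 0))]
      rw [← walk_append, hsplit]
    rw [hset, hfin]
  | case5 c1 c2 rest hcontra ihL ihR =>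
    intro h
    have hLv := ihL (fun c hc => h c (List.take_subset _ _ hc))
    have hRv := ihR (fun c hc => h c (List.drop_subset _ _ hc))
    exact (hcontra _ _ _ _ hLv hRv).elim

-- ===== VERDICT (by name: the statement is the Claim_ definition above) =====
theorem deliver_spec : Claim_equal_deliver := by
  intro path _ hpre
  have h : ValidDirs path.toList := by
    have h0 := by simpa [Pre_deliver, List.all_eq_true] using hpre
    intro c hc; have := h0 c hc; tauto
  unfold Spec_deliver deliver deliver_alt
  rw [solveB_eq _ h, deliverLoop_eq _ h]
  exact (ofList_walk _ _).symm
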